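-- pv_equiv track=rewrite | github.com/nuelswimsuit-coder/Nexus-Orchestrator | nexus_supreme/core/tools/monitor.py | format_sessions
-- ===== SOURCE A (Python) =====
-- def format_sessions(results: dict[str, str]) -> str:
--     live  = [k for k, v in results.items() if v == "live"]
--     dead  = [k for k, v in results.items() if v == "dead"]
--     flood = [k for k, v in results.items() if v.startswith("flood")]
--     ban   = [k for k, v in results.items() if v == "banned"]
--     err   = [k for k, v in results.items() if v.startswith("error") or v == "timeout"]
--
--     lines = [
--         "🔌 *בדיקת תקינות סשנים*",
--         f"━━━━━━━━━━━━━━━━━━━━━━━━",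
--         f"✅ פעיל:  {len(live)}/{len(results)}",
--         f"❌ מנותק: {len(dead)}",
--         f"🚫 חסום:  {len(ban)}",
--         f"⏳ Flood:  {len(flood)}",
--         f"⚠️ שגיאה: {len(err)}",
--         "━━━━━━━━━━━━━━━━━━━━━━━━",
--     ]
--     if dead:
--         lines.append("❌ " + ", ".join(dead[:8]))
--     if ban:
--         lines.append("🚫 " + ", ".join(ban[:8]))
--     if flood:
--         lines.append("⏳ " + ", ".join(flood[:5]))
--     return "\n".join(lines)
-- ===== SOURCE B (Python) =====
-- def _classify(v):
--     if v == "live":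
--         return 0
--     if v == "dead":
--         return 1
--     if v.startswith("flood"):
--         return 2
--     if v == "banned":
--         return 3
--     if v.startswith("error") or v == "timeout":
--         return 4
--     return None
--
--
-- def format_sessions(results: dict[str, str]) -> str:
--     cats = [[], [], [], [], []]
--     for k, v in results.items():
--         c = _classify(v)
--         if c is not None:
--             cats[c].append(k)
--     live, dead, flood, ban, err = cats
--
--     lines = [
--         "🔌 *בדיקת תקינות סשנים*",
--         "━━━━━━━━━━━━━━━━━━━━━━━━",
--         f"✅ פעיל:  {len(live)}/{len(results)}",
--         f"❌ מנותק: {len(dead)}",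
--         f"🚫 חסום:  {len(ban)}",
--         f"⏳ Flood:  {len(flood)}",
--         f"⚠️ שגיאה: {len(err)}",
--         "━━━━━━━━━━━━━━━━━━━━━━━━",
--     ]
--     for prefix, lst, n in (("❌ ", dead, 8), ("🚫 ", ban, 8), ("⏳ ", flood, 5)):
--         if lst:
--             lines.append(prefix + ", ".join(lst[:n]))
--     return "\n".join(lines)
-- ===== Notes on version B (the rewrite author's own statement) =====
-- stated objective: simpler
-- what changed: Replaces five separate scans of results (one comprehension per category) with a single pass that routes each entry through a classify helper into one of five buckets, and a data-driven loop over (prefix, list, limit) triples for the detail lines.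
import Mathlib
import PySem

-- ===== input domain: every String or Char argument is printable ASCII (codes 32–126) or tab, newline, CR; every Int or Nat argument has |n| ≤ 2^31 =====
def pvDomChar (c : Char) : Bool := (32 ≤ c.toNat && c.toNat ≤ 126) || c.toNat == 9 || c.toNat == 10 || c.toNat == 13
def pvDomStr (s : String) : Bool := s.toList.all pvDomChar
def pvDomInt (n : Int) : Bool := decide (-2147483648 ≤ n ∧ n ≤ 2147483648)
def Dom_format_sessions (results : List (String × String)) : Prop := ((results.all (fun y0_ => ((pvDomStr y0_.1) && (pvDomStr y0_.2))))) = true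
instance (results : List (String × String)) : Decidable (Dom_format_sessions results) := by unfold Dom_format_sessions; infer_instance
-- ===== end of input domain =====

-- B replaces A's five separate scans of results with one classify-and-bucket pass and a
-- data-driven loop for the detail lines (objective: simpler).

-- ===== PORT A =====
def format_sessions (results : List (String × String)) : String :=
  let live  := (results.filter (fun p => p.2 == "live")).map Prod.fst
  let dead  := (results.filter (fun p => p.2 == "dead")).map Prod.fst
  let flood := (results.filter (fun p => PySem.Str.startswith p.2 "flood")).map Prod.fst
  let ban   := (results.filter (fun p => p.2 == "banned")).map Prod.fst
  let err   := (results.filter (fun p => PySem.Str.startswith p.2 "error" || p.2 == "timeout")).map Prod.fst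
  let lines : List String := [
    "🔌 *בדיקת תקינות סשנים*",
    "━━━━━━━━━━━━━━━━━━━━━━━━",
    "✅ פעיל:  " ++ PySem.Int.toStr (PySem.List.len live) ++ "/" ++ PySem.Int.toStr (PySem.List.len results),
    "❌ מנותק: " ++ PySem.Int.toStr (PySem.List.len dead),
    "🚫 חסום:  " ++ PySem.Int.toStr (PySem.List.len ban),
    "⏳ Flood:  " ++ PySem.Int.toStr (PySem.List.len flood),
    "⚠️ שגיאה: " ++ PySem.Int.toStr (PySem.List.len err),
    "━━━━━━━━━━━━━━━━━━━━━━━━"]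
  let lines := if dead.isEmpty then lines else lines ++ ["❌ " ++ PySem.Str.join ", " (PySem.List.slice dead none (some 8))]
  let lines := if ban.isEmpty then lines else lines ++ ["🚫 " ++ PySem.Str.join ", " (PySem.List.slice ban none (some 8))]
  let lines := if flood.isEmpty then lines else lines ++ ["⏳ " ++ PySem.Str.join ", " (PySem.List.slice flood none (some 5))]
  PySem.Str.join "\n" lines

-- ===== PORT B =====
def pvClassify (v : String) : Option Nat :=
  if v == "live" then some 0
  else if v == "dead" then some 1
  else if PySem.Str.startswith v "flood" then some 2
  else if v == "banned" then some 3
  else if PySem.Str.startswith v "error" || v == "timeout" then some 4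
  else none

-- python's list of five bucket lists is ported as a 5-tuple; cats[c].append(k) is the match update (exact)
def pvBuckets := List String × List String × List String × List String × List String

def pvStep (cats : pvBuckets) (p : String × String) : pvBuckets :=
  match pvClassify p.2 with
  | some 0 => (cats.1 ++ [p.1], cats.2.1, cats.2.2.1, cats.2.2.2.1, cats.2.2.2.2)
  | some 1 => (cats.1, cats.2.1 ++ [p.1], cats.2.2.1, cats.2.2.2.1, cats.2.2.2.2)
  | some 2 => (cats.1, cats.2.1, cats.2.2.1 ++ [p.1], cats.2.2.2.1, cats.2.2.2.2)
  | some 3 => (cats.1, cats.2.1, cats.2.2.1, cats.2.2.2.1 ++ [p.1], cats.2.2.2.2)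
  | some 4 => (cats.1, cats.2.1, cats.2.2.1, cats.2.2.2.1, cats.2.2.2.2 ++ [p.1])
  | _ => cats

def format_sessions_alt (results : List (String × String)) : String :=
  let cats : pvBuckets := results.foldl pvStep ([], [], [], [], [])
  let live := cats.1
  let dead := cats.2.1
  let flood := cats.2.2.1
  let ban := cats.2.2.2.1
  let err := cats.2.2.2.2
  let lines : List String := [
    "🔌 *בדיקת תקינות סשנים*",
    "━━━━━━━━━━━━━━━━━━━━━━━━",
    "✅ פעיל:  " ++ PySem.Int.toStr (PySem.List.len live) ++ "/" ++ PySem.Int.toStr (PySem.List.len results),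
    "❌ מנותק: " ++ PySem.Int.toStr (PySem.List.len dead),
    "🚫 חסום:  " ++ PySem.Int.toStr (PySem.List.len ban),
    "⏳ Flood:  " ++ PySem.Int.toStr (PySem.List.len flood),
    "⚠️ שגיאה: " ++ PySem.Int.toStr (PySem.List.len err),
    "━━━━━━━━━━━━━━━━━━━━━━━━"]
  let lines := [("❌ ", dead, (8 : Int)), ("🚫 ", ban, (8 : Int)), ("⏳ ", flood, (5 : Int))].foldl
    (fun ls t => if t.2.1.isEmpty then ls
                 else ls ++ [t.1 ++ PySem.Str.join ", " (PySem.List.slice t.2.1 none (some t.2.2))]) lines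
  PySem.Str.join "\n" lines

-- ===== PRECONDITION & SPEC =====
-- Pre_ excludes association lists with duplicate keys: the Python argument is a dict, which
-- cannot contain a duplicate key, so such lists correspond to no Python input.
def Pre_format_sessions (results : List (String × String)) : Prop :=
  (results.map Prod.fst).Nodup
instance (results : List (String × String)) : Decidable (Pre_format_sessions results) := by
  unfold Pre_format_sessions; infer_instance

def pvWitness_format_sessions : (List (String × String)) := [("a", "live"), ("b", "dead")]

def Spec_format_sessions (results : List (String × String)) (out : String) : Prop := out = format_sessions_alt results
instance (results : List (String × String)) (out : String) : Decidable (Spec_format_sessions results out) := by unfold Spec_format_sessions; infer_instance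

-- ===== CLAIM (what is proved, stated in full; the proofs are below) =====
def Claim_equal_format_sessions : Prop := ∀ (results : List (String × String)), Dom_format_sessions results → Pre_format_sessions results → Spec_format_sessions results (format_sessions results)

-- ===== LEMMAS AND PROOFS =====

lemma startswith_disjoint (v : String)
    (h : PySem.Chars.startswith v.toList "flood".toList = true) :
    PySem.Chars.startswith v.toList "error".toList = false := by
  by_contra h'
  rw [Bool.not_eq_false] at h'
  rw [PySem.Chars.startswith_iff] at h h'
  obtain ⟨t, ht⟩ := h
  obtain ⟨s, hs⟩ := h'
  rw [← ht] at hs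
  simp at hs

lemma fold_buckets (rs : List (String × String)) :
    ∀ l d f b e : List String,
    rs.foldl pvStep (l, d, f, b, e) =
      (l ++ (rs.filter (fun p => p.2 == "live")).map Prod.fst,
       d ++ (rs.filter (fun p => p.2 == "dead")).map Prod.fst,
       f ++ (rs.filter (fun p => PySem.Str.startswith p.2 "flood")).map Prod.fst,
       b ++ (rs.filter (fun p => p.2 == "banned")).map Prod.fst,
       e ++ (rs.filter (fun p => PySem.Str.startswith p.2 "error" || p.2 == "timeout")).map Prod.fst) := by
  induction rs with
  | nil => intro l d f b e; simp
  | cons p rest ih =>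
    intro l d f b e
    obtain ⟨k, v⟩ := p
    simp only [List.foldl_cons, pvStep, pvClassify, List.filter_cons]
    have cLF : PySem.Chars.startswith ['l', 'i', 'v', 'e'] ['f', 'l', 'o', 'o', 'd'] = false := by decide
    have cLE : PySem.Chars.startswith ['l', 'i', 'v', 'e'] ['e', 'r', 'r', 'o', 'r'] = false := by decide
    have cDF : PySem.Chars.startswith ['d', 'e', 'a', 'd'] ['f', 'l', 'o', 'o', 'd'] = false := by decide
    have cDE : PySem.Chars.startswith ['d', 'e', 'a', 'd'] ['e', 'r', 'r', 'o', 'r'] = false := by decide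
    have cBF : PySem.Chars.startswith ['b', 'a', 'n', 'n', 'e', 'd'] ['f', 'l', 'o', 'o', 'd'] = false := by decide
    have cBE : PySem.Chars.startswith ['b', 'a', 'n', 'n', 'e', 'd'] ['e', 'r', 'r', 'o', 'r'] = false := by decide
    have cTF : PySem.Chars.startswith ['t', 'i', 'm', 'e', 'o', 'u', 't'] ['f', 'l', 'o', 'o', 'd'] = false := by decide
    have cTE : PySem.Chars.startswith ['t', 'i', 'm', 'e', 'o', 'u', 't'] ['e', 'r', 'r', 'o', 'r'] = false := by decide
    by_cases h1 : v = "live"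
    · simp [h1, cLF, cLE, ih, List.append_assoc]
    · by_cases h2 : v = "dead"
      · simp [h2, cDF, cDE, ih, List.append_assoc]
      · by_cases h3 : PySem.Chars.startswith v.toList ['f', 'l', 'o', 'o', 'd'] = true
        · have e4 : v ≠ "banned" := by rintro rfl; revert h3; decide
          have e5 : PySem.Chars.startswith v.toList ['e', 'r', 'r', 'o', 'r'] = false := by
            have := startswith_disjoint v (by simpa [PySem.Str.startswith] using h3)
            simpa [PySem.Str.startswith] using this
          have e6 : v ≠ "timeout" := by rintro rfl; revert h3; decide
          simp [h1, h2, h3, e4, e5, e6, ih, List.append_assoc]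
        · by_cases h4 : v = "banned"
          · simp [h4, cBF, cBE, ih, List.append_assoc]
          · by_cases h5 : PySem.Chars.startswith v.toList ['e', 'r', 'r', 'o', 'r'] = true
            · simp [h1, h2, h3, h4, h5, ih, List.append_assoc]
            · by_cases h6 : v = "timeout"
              · simp [h6, cTF, cTE, ih, List.append_assoc]
              · simp [h1, h2, h3, h4, h5, h6, ih]

-- ===== VERDICT (by name: the statement is the Claim_ definition above) =====
theorem format_sessions_spec : Claim_equal_format_sessions := by
  intro results _ _
  unfold Spec_format_sessions format_sessions format_sessions_alt
  rw [fold_buckets]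
  simp only [List.foldl, List.nil_append]
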